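-- pv_equiv track=rewrite | github.com/highly-anu/training | scripts/migrate_exercises.py | _resolve_packages
-- ===== SOURCE A (Python) =====
-- _SOURCE_TO_PKG = {
--     'Starting Strength': 'starting_strength',
--     'Gym Jones':         'gym_jones',
--     'Horsemen':          'horsemen_gpp',
--     'Dan John':          'horsemen_gpp',
--     'CrossFit':          'crossfit',
--     'CrossFit Endurance': 'crossfit',
--     'Wildman':           'wildman_kettlebell',
--     'Pavel':             'wildman_kettlebell',
--     'Uphill Athlete':    'uphill_athlete',
--     'Ido Portal':        'ido_portal',
--     'ATG':               'atg',
--     'plan.md section 10': 'atg',   # rehab exercises — ATG owns the rehab protocol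
-- }
--
-- def _resolve_packages(sources: list[str]) -> list[str]:
--     """Return deduplicated list of package IDs for the given source strings."""
--     pkgs = []
--     seen = set()
--     for s in sources:
--         pkg = _SOURCE_TO_PKG.get(s)
--         if pkg and pkg not in seen:
--             pkgs.append(pkg)
--             seen.add(pkg)
--     return pkgs
-- ===== SOURCE B (Python) =====
-- _SOURCE_TO_PKG = {
--     'Starting Strength': 'starting_strength',
--     'Gym Jones':         'gym_jones',
--     'Horsemen':          'horsemen_gpp',
--     'Dan John':          'horsemen_gpp',
--     'CrossFit':          'crossfit',
--     'CrossFit Endurance': 'crossfit',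
--     'Wildman':           'wildman_kettlebell',
--     'Pavel':             'wildman_kettlebell',
--     'Uphill Athlete':    'uphill_athlete',
--     'Ido Portal':        'ido_portal',
--     'ATG':               'atg',
--     'plan.md section 10': 'atg',
-- }
--
-- # The distinct package IDs of the table, in any fixed order.
-- _ALL_PKGS = ['starting_strength', 'gym_jones', 'horsemen_gpp', 'crossfit',
--              'wildman_kettlebell', 'uphill_athlete', 'ido_portal', 'atg']
--
--
-- def _resolve_packages(sources: list[str]) -> list[str]:
--     """Return deduplicated list of package IDs for the given source strings."""
--     # For each known package, find the first position in `sources` that maps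
--     # to it; keep the packages that occur and order them by that position.
--     order = []
--     for pkg in _ALL_PKGS:
--         first = next((i for i, s in enumerate(sources)
--                       if _SOURCE_TO_PKG.get(s) == pkg), None)
--         if first is not None:
--             order.append((first, pkg))
--     order.sort(key=lambda t: t[0])
--     return [pkg for _, pkg in order]
-- ===== Notes on version B (the rewrite author's own statement) =====
-- stated objective: alternative
-- what changed: Instead of one pass over sources with a seen-set, B iterates over the fixed table of distinct package IDs, computes each package's first-occurrence index in sources, and sorts the occurring packages by that index.
import Mathlib
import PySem

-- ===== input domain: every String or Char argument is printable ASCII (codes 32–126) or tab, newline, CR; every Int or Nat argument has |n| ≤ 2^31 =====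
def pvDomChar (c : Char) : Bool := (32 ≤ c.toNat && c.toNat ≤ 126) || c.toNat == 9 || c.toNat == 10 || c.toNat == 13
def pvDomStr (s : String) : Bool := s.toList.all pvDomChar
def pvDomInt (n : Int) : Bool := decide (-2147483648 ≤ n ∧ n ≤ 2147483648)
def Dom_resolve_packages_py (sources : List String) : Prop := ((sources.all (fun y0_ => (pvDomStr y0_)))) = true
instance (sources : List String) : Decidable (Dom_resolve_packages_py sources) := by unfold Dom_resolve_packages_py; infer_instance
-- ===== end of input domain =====

-- B replaces A's single pass over sources with a seen-set by a scan over the fixed package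
-- table: first-occurrence index in sources per package, then a sort by that index; objective: alternative.

-- the module constant _SOURCE_TO_PKG, shared by A and B
def pvSourceToPkg : PySem.Dict String String := PySem.Dict.ofList
  [ ("Starting Strength", "starting_strength"),
    ("Gym Jones", "gym_jones"),
    ("Horsemen", "horsemen_gpp"),
    ("Dan John", "horsemen_gpp"),
    ("CrossFit", "crossfit"),
    ("CrossFit Endurance", "crossfit"),
    ("Wildman", "wildman_kettlebell"),
    ("Pavel", "wildman_kettlebell"),
    ("Uphill Athlete", "uphill_athlete"),
    ("Ido Portal", "ido_portal"),
    ("ATG", "atg"),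
    ("plan.md section 10", "atg") ]

-- ===== PORT A =====
-- single pass: accumulate (pkgs, seen); `pkg and pkg not in seen` = lookup succeeded, truthy (non-empty), not yet seen
def resolve_packages_py (sources : List String) : List String :=
  (sources.foldl
    (fun (st : List String × PySem.Set String) s =>
      match pvSourceToPkg.get? s with
      | none => st
      | some pkg =>
          if pkg != "" && !(PySem.Set.contains st.2 pkg)
          then (st.1 ++ [pkg], PySem.Set.add st.2 pkg)
          else st)
    ([], PySem.Set.empty)).1

-- ===== PORT B =====
-- the module constant _ALL_PKGS (B's fixed list of the table's distinct package IDs)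
def pvAllPkgs : List String :=
  ["starting_strength", "gym_jones", "horsemen_gpp", "crossfit",
   "wildman_kettlebell", "uphill_athlete", "ido_portal", "atg"]

-- for pkg in _ALL_PKGS: first = next((i for i,s in enumerate(sources) if get(s)==pkg), None);
-- if first is not None: order.append((first, pkg)); then order.sort(key=fst); return the snds
def resolve_packages_py_alt (sources : List String) : List String :=
  let order := pvAllPkgs.foldl
    (fun (acc : List (Int × String)) pkg =>
      match ((PySem.List.enumerate sources).find?
               (fun p => pvSourceToPkg.get? p.2 == some pkg)).map (fun p => p.1) with
      | some i => acc ++ [(i, pkg)]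
      | none => acc) []
  (PySem.List.sorted order (fun t => t.1) false).map (fun t => t.2)

-- ===== PRECONDITION & SPEC =====
def Spec_resolve_packages_py (sources : List String) (out : List String) : Prop := out = resolve_packages_py_alt sources
instance (sources : List String) (out : List String) : Decidable (Spec_resolve_packages_py sources out) := by unfold Spec_resolve_packages_py; infer_instance

-- ===== CLAIM (what is proved, stated in full; the proofs are below) =====
def Claim_equal_resolve_packages_py : Prop := ∀ (sources : List String), Dom_resolve_packages_py sources → Spec_resolve_packages_py sources (resolve_packages_py sources)

-- ===== LEMMAS AND PROOFS =====

-- abbreviation for the table lookup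
def pvF (s : String) : Option String := pvSourceToPkg.get? s

-- every value the table returns is one of the eight package IDs (hence nonempty)
lemma pvF_mem_pkgs {s v : String} (h : pvF s = some v) : v ∈ pvAllPkgs := by
  have hm := PySem.Dict.mem_items_of_get?_eq_some pvSourceToPkg h
  have hit : pvSourceToPkg.items
      = [ ("Starting Strength", "starting_strength"),
          ("Gym Jones", "gym_jones"),
          ("Horsemen", "horsemen_gpp"),
          ("Dan John", "horsemen_gpp"),
          ("CrossFit", "crossfit"),
          ("CrossFit Endurance", "crossfit"),
          ("Wildman", "wildman_kettlebell"),
          ("Pavel", "wildman_kettlebell"),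
          ("Uphill Athlete", "uphill_athlete"),
          ("Ido Portal", "ido_portal"),
          ("ATG", "atg"),
          ("plan.md section 10", "atg") ] := by decide
  rw [hit] at hm
  simp only [List.mem_cons, List.not_mem_nil, or_false, Prod.mk.injEq] at hm
  rcases hm with ⟨_, rfl⟩ | ⟨_, rfl⟩ | ⟨_, rfl⟩ | ⟨_, rfl⟩ | ⟨_, rfl⟩ | ⟨_, rfl⟩
    | ⟨_, rfl⟩ | ⟨_, rfl⟩ | ⟨_, rfl⟩ | ⟨_, rfl⟩ | ⟨_, rfl⟩ | ⟨_, rfl⟩ <;> decide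

-- first-index helper (Nat level), used only in the proofs
def pvFidx (g : String → Bool) : List String → Option Nat
  | [] => none
  | x :: xs => if g x then some 0 else (pvFidx g xs).map (· + 1)

lemma pvFidx_isSome_iff (g : String → Bool) (l : List String) :
    (pvFidx g l).isSome = true ↔ ∃ s ∈ l, g s = true := by
  induction l with
  | nil => simp [pvFidx]
  | cons x xs ih =>
      by_cases hx : g x = true
      · simp [pvFidx, hx]
      · simp [pvFidx, hx, ih]

-- bridge: the port's find?-over-enumerate computes pvFidx (shifted by the start index)
lemma pvEnum_find_eq (g : String → Bool) (l : List String) : ∀ (st : Int),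
    ((PySem.List.enumerate l st).find? (fun p => g p.2)).map (fun p => p.1)
      = (pvFidx g l).map (fun n => st + (n : Int)) := by
  induction l with
  | nil => intro st; simp [PySem.List.enumerate_nil, pvFidx]
  | cons x xs ih =>
      intro st
      rw [PySem.List.enumerate_cons]
      by_cases hx : g x = true
      · simp [hx, pvFidx]
      · simp only [List.find?_cons, hx]
        simp only [Bool.false_eq_true, if_false, pvFidx, hx, ih (st + 1)]
        cases pvFidx g xs with
        | none => simp
        | some n => simp; omega

-- membership in filterMap pvF gives a successful first index
lemma pvFidx_isSome_of_mem {l : List String} {p : String}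
    (h : p ∈ l.filterMap pvF) : (pvFidx (fun s => pvF s == some p) l).isSome = true := by
  rw [pvFidx_isSome_iff]
  rcases List.mem_filterMap.mp h with ⟨s, hs, hf⟩
  exact ⟨s, hs, by simp [hf]⟩

-- the Nat rank of a package: its first index in sources (0 when absent)
def pvRank (l : List String) (p : String) : Nat :=
  (pvFidx (fun s => pvF s == some p) l).getD 0

-- foldl Set.add appends the first occurrences of elements not already present
lemma pvFoldlAdd_eq (L : List String) : ∀ (acc : List String),
    L.foldl PySem.Set.add acc
      = acc ++ (PySem.List.dedup L).filter (fun y => !(acc.contains y)) := by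
  induction L with
  | nil => intro acc; simp [PySem.List.dedup]
  | cons x L ih =>
      intro acc
      have hdc : PySem.List.dedup (x :: L)
          = x :: (PySem.List.dedup L).filter (fun y => y != x) := by
        have h1 : PySem.List.dedup (x :: L) = L.foldl PySem.Set.add [x] := by
          simp [PySem.List.dedup_eq_ofList, PySem.Set.ofList_eq_foldl, List.foldl_cons,
            PySem.Set.add, PySem.Set.contains]
        rw [h1, ih [x]]
        simp only [List.singleton_append, List.cons.injEq, true_and]
        apply List.filter_congr
        intro y _
        by_cases hyx : y = x
        · subst hyx; simp
        · simp [List.contains_eq_mem, bne, hyx]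
      rw [List.foldl_cons, ih, hdc]
      by_cases hx : x ∈ acc
      · have hadd : PySem.Set.add acc x = acc := by
          simp [PySem.Set.add, PySem.Set.contains, hx]
        rw [hadd]
        congr 1
        simp only [List.filter_cons, List.contains_eq_mem, hx, decide_true,
          Bool.not_true]
        rw [List.filter_filter]
        apply List.filter_congr
        intro y _
        by_cases hyx : y = x
        · subst hyx; simp [hx]
        · simp [hyx, bne]
      · have hadd : PySem.Set.add acc x = acc ++ [x] := by
          simp [PySem.Set.add, PySem.Set.contains, hx]
        rw [hadd]
        simp only [List.filter_cons, List.contains_eq_mem, hx, decide_false,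
          Bool.not_false, if_true, List.append_assoc, List.singleton_append]
        congr 2
        rw [List.filter_filter]
        apply List.filter_congr
        intro y _
        by_cases hyx : y = x
        · subst hyx; simp [hx]
        · simp [hyx, bne]

lemma pvDedup_cons (x : String) (L : List String) :
    PySem.List.dedup (x :: L) = x :: (PySem.List.dedup L).filter (fun y => y != x) := by
  have h1 : PySem.List.dedup (x :: L) = L.foldl PySem.Set.add [x] := by
    simp [PySem.List.dedup_eq_ofList, PySem.Set.ofList_eq_foldl, List.foldl_cons,
      PySem.Set.add, PySem.Set.contains]
  rw [h1, pvFoldlAdd_eq L [x]]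
  simp only [List.singleton_append, List.cons.injEq, true_and]
  apply List.filter_congr
  intro y _
  by_cases hyx : y = x
  · subst hyx; simp
  · simp [List.contains_eq_mem, bne, hyx]

-- KEY LEMMA: the first-occurrence dedup of the mapped list is strictly increasing in pvRank
lemma pvDedup_pairwise_rank (l : List String) :
    (PySem.List.dedup (l.filterMap pvF)).Pairwise
      (fun p q => pvRank l p < pvRank l q) := by
  induction l with
  | nil => simp [PySem.List.dedup]
  | cons s l ih =>
      cases hf : pvF s with
      | none =>
          have hmap : (s :: l).filterMap pvF = l.filterMap pvF := by
            simp [hf]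
          rw [hmap]
          refine List.Pairwise.imp_of_mem ?_ ih
          intro p q hp hq hlt
          have hp' : p ∈ l.filterMap pvF := (PySem.List.mem_dedup _ _).mp hp
          have hq' : q ∈ l.filterMap pvF := (PySem.List.mem_dedup _ _).mp hq
          have hps := pvFidx_isSome_of_mem hp'
          have hqs := pvFidx_isSome_of_mem hq'
          have hgp : ((pvF s == some p) : Bool) = false := by simp [hf]
          have hgq : ((pvF s == some q) : Bool) = false := by simp [hf]
          unfold pvRank at hlt ⊢
          simp only [pvFidx, hgp, hgq, Bool.false_eq_true, if_false]
          rcases Option.isSome_iff_exists.mp hps with ⟨np, hnp⟩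
          rcases Option.isSome_iff_exists.mp hqs with ⟨nq, hnq⟩
          simp only [hnp, hnq, Option.map_some, Option.getD_some] at hlt ⊢
          omega
      | some v =>
          have hmap : (s :: l).filterMap pvF = v :: l.filterMap pvF := by
            simp [hf]
          rw [hmap, pvDedup_cons]
          constructor
          · -- head v has rank 0; every later q ≠ v has positive rank
            intro q hq
            have hq1 := List.mem_filter.mp hq
            have hqne : q ≠ v := by
              have := hq1.2; simp [bne] at this; exact this
            have hq' : q ∈ l.filterMap pvF := (PySem.List.mem_dedup _ _).mp hq1.1
            have hqs := pvFidx_isSome_of_mem hq'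
            have hv0 : pvRank (s :: l) v = 0 := by
              unfold pvRank
              simp [pvFidx, hf]
            have hgq : ((pvF s == some q) : Bool) = false := by
              simp [hf]; intro h; exact absurd h.symm hqne
            have hpos : 0 < pvRank (s :: l) q := by
              unfold pvRank
              simp only [pvFidx, hgq, Bool.false_eq_true, if_false]
              rcases Option.isSome_iff_exists.mp hqs with ⟨nq, hnq⟩
              simp [hnq]
            omega
          · -- tail: transfer the ih through the +1 rank shift
            refine List.Pairwise.imp_of_mem ?_
              (List.Pairwise.filter _ ih)
            intro p q hp hq hlt
            have hp1 := List.mem_filter.mp hp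
            have hq1 := List.mem_filter.mp hq
            have hpne : p ≠ v := by have := hp1.2; simp [bne] at this; exact this
            have hqne : q ≠ v := by have := hq1.2; simp [bne] at this; exact this
            have hp' : p ∈ l.filterMap pvF := (PySem.List.mem_dedup _ _).mp hp1.1
            have hq' : q ∈ l.filterMap pvF := (PySem.List.mem_dedup _ _).mp hq1.1
            have hps := pvFidx_isSome_of_mem hp'
            have hqs := pvFidx_isSome_of_mem hq'
            have hgp : ((pvF s == some p) : Bool) = false := by
              simp [hf]; intro h; exact absurd h.symm hpne
            have hgq : ((pvF s == some q) : Bool) = false := by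
              simp [hf]; intro h; exact absurd h.symm hqne
            unfold pvRank at hlt ⊢
            simp only [pvFidx, hgp, hgq, Bool.false_eq_true, if_false]
            rcases Option.isSome_iff_exists.mp hps with ⟨np, hnp⟩
            rcases Option.isSome_iff_exists.mp hqs with ⟨nq, hnq⟩
            simp only [hnp, hnq, Option.map_some, Option.getD_some] at hlt ⊢
            omega

-- ==== A-side reduction: A = dedup (filterMap pvF) ====

def pvStepA (st : List String × PySem.Set String) (s : String) : List String × PySem.Set String :=
  match pvSourceToPkg.get? s with
  | none => st
  | some pkg =>
      if pkg != "" && !(PySem.Set.contains st.2 pkg)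
      then (st.1 ++ [pkg], PySem.Set.add st.2 pkg)
      else st

def pvStepB (l : List String) (s : String) : List String :=
  match (pvSourceToPkg.get? s).filter (fun pkg => pkg != "") with
  | some pkg => PySem.Set.add l pkg
  | none => l

lemma pvStepA_eq (l : List String) (s : String) : pvStepA (l, l) s = (pvStepB l s, pvStepB l s) := by
  unfold pvStepA pvStepB
  cases hg : pvSourceToPkg.get? s with
  | none => rfl
  | some pkg =>
      by_cases hp : pkg = ""
      · simp [hp, Option.filter]
      · by_cases hc : pkg ∈ l
        · simp [hp, hc, Option.filter, PySem.Set.add]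
        · simp [hp, hc, Option.filter, PySem.Set.add]

lemma pvFoldA_eq (sources : List String) : ∀ (l : List String),
    (sources.foldl pvStepA (l, l)).1 = sources.foldl pvStepB l := by
  induction sources with
  | nil => intro l; rfl
  | cons s rest ih =>
      intro l
      rw [List.foldl_cons, List.foldl_cons, pvStepA_eq]
      exact ih (pvStepB l s)

lemma pvA_eq_dedup (sources : List String) :
    resolve_packages_py sources = PySem.List.dedup (sources.filterMap pvF) := by
  have hA : resolve_packages_py sources = (sources.foldl pvStepA ([], [])).1 := rfl
  have hfm : sources.filterMap (fun s => (pvF s).filter (fun pkg => pkg != ""))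
      = sources.filterMap pvF := by
    apply List.filterMap_congr
    intro s _
    cases hf : pvF s with
    | none => simp [Option.filter]
    | some v =>
        have hv : (v != "") = true := by
          have := pvF_mem_pkgs hf
          revert this
          simp only [pvAllPkgs, List.mem_cons, List.not_mem_nil, or_false]
          rintro (rfl | rfl | rfl | rfl | rfl | rfl | rfl | rfl) <;> decide
        simp [Option.filter, hv]
  have hB : PySem.List.dedup (sources.filterMap pvF) = List.foldl pvStepB [] sources := by
    rw [← hfm, PySem.List.dedup_eq_ofList, PySem.Set.ofList_eq_foldl, List.foldl_filterMap]
    apply PySem.List.foldl_congr_mem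
    intro acc x _
    unfold pvStepB pvF
    cases Option.filter (fun pkg => pkg != "") (pvSourceToPkg.get? x) <;> rfl
  rw [hA, hB, pvFoldA_eq]

-- ==== B-side reduction ====

-- the port's per-package first index, Int-valued
def pvFirst (sources : List String) (pkg : String) : Option Int :=
  ((PySem.List.enumerate sources).find? (fun p => pvSourceToPkg.get? p.2 == some pkg)).map
    (fun p => p.1)

lemma pvFirst_eq (sources : List String) (pkg : String) :
    pvFirst sources pkg
      = (pvFidx (fun s => pvF s == some pkg) sources).map (fun n => (n : Int)) := by
  unfold pvFirst
  rw [pvEnum_find_eq (fun s => pvSourceToPkg.get? s == some pkg) sources 0]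
  unfold pvF
  cases pvFidx (fun s => pvSourceToPkg.get? s == some pkg) sources <;> simp

-- the annotated-pair map used on both sides
def pvH (sources : List String) (p : String) : Int × String :=
  ((pvFirst sources p).getD 0, p)

-- B's accumulation loop, named: over any package list it collects (first, pkg) pairs
lemma pvOrder_eq (sources : List String) (ps : List String) : ∀ (acc : List (Int × String)),
    ps.foldl
      (fun (acc : List (Int × String)) pkg =>
        match ((PySem.List.enumerate sources).find?
                 (fun p => pvSourceToPkg.get? p.2 == some pkg)).map (fun p => p.1) with
        | some i => acc ++ [(i, pkg)]
        | none => acc) acc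
    = acc ++ (ps.filter (fun p => (pvFirst sources p).isSome)).map (pvH sources) := by
  induction ps with
  | nil => intro acc; simp
  | cons p ps ih =>
      intro acc
      rw [List.foldl_cons]
      cases hp : pvFirst sources p with
      | none =>
          rw [show ((PySem.List.enumerate sources).find?
              (fun q => pvSourceToPkg.get? q.2 == some p)).map (fun q => q.1) = none from hp]
          simp only [List.filter_cons, hp, Option.isSome_none, Bool.false_eq_true, if_false]
          exact ih acc
      | some i =>
          rw [show ((PySem.List.enumerate sources).find?
              (fun q => pvSourceToPkg.get? q.2 == some p)).map (fun q => q.1) = some i from hp]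
          simp only [List.filter_cons, hp, Option.isSome_some, if_true, List.map_cons]
          rw [ih]
          simp [pvH, hp]

-- the Int key of a pair is the cast of pvRank (also when the package is absent)
lemma pvH_fst (sources : List String) (p : String) :
    (pvH sources p).1 = (pvRank sources p : Int) := by
  unfold pvH pvRank
  rw [pvFirst_eq]
  cases pvFidx (fun s => pvF s == some p) sources <;> simp

-- membership characterisation connecting the two bases
lemma pvMem_iff (sources : List String) (p : String) :
    p ∈ sources.filterMap pvF ↔ p ∈ pvAllPkgs ∧ (pvFirst sources p).isSome = true := by
  constructor
  · intro h
    rcases List.mem_filterMap.mp h with ⟨s, hs, hf⟩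
    refine ⟨pvF_mem_pkgs hf, ?_⟩
    rw [pvFirst_eq]
    have := pvFidx_isSome_of_mem h
    cases hx : pvFidx (fun s => pvF s == some p) sources
    · rw [hx] at this; simp at this
    · simp
  · rintro ⟨-, hs⟩
    rw [pvFirst_eq] at hs
    have : (pvFidx (fun s => pvF s == some p) sources).isSome = true := by
      cases hx : pvFidx (fun s => pvF s == some p) sources
      · rw [hx] at hs; simp at hs
      · simp
    rcases (pvFidx_isSome_iff _ _).mp this with ⟨s, hsm, hg⟩
    exact List.mem_filterMap.mpr ⟨s, hsm, by simpa using hg⟩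

-- B's value, written without the let-binding
lemma pvB_eq (sources : List String) :
    resolve_packages_py_alt sources
      = (PySem.List.sorted
          ((pvAllPkgs.filter (fun p => (pvFirst sources p).isSome)).map (pvH sources))
          (fun t => t.1)).map (fun t => t.2) := by
  show (PySem.List.sorted
      (pvAllPkgs.foldl
        (fun (acc : List (Int × String)) pkg =>
          match ((PySem.List.enumerate sources).find?
                   (fun p => pvSourceToPkg.get? p.2 == some pkg)).map (fun p => p.1) with
          | some i => acc ++ [(i, pkg)]
          | none => acc) [])
      (fun t => t.1)).map (fun t => t.2) = _
  rw [pvOrder_eq sources pvAllPkgs [], List.nil_append]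

-- ===== VERDICT (by name: the statement is the Claim_ definition above) =====
theorem resolve_packages_py_spec : Claim_equal_resolve_packages_py := by
  intro sources _
  show resolve_packages_py sources = resolve_packages_py_alt sources
  rw [pvA_eq_dedup, pvB_eq]
  have hpermBase : (PySem.List.dedup (sources.filterMap pvF)).Perm
      (pvAllPkgs.filter (fun p => (pvFirst sources p).isSome)) := by
    rw [List.perm_ext_iff_of_nodup (PySem.List.nodup_dedup _)
      (List.Nodup.filter _ (by decide))]
    intro a
    rw [PySem.List.mem_dedup, pvMem_iff, List.mem_filter]
  have hperm : ((PySem.List.dedup (sources.filterMap pvF)).map (pvH sources)).Perm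
      ((pvAllPkgs.filter (fun p => (pvFirst sources p).isSome)).map (pvH sources)) :=
    hpermBase.map (pvH sources)
  have hpair : ((PySem.List.dedup (sources.filterMap pvF)).map (pvH sources)).Pairwise
      (fun a b : Int × String => a.1 < b.1) := by
    rw [List.pairwise_map]
    refine (pvDedup_pairwise_rank sources).imp ?_
    intro p q hlt
    rw [pvH_fst, pvH_fst]
    exact_mod_cast hlt
  rw [PySem.List.sorted_eq_of_perm_of_pairwise_lt _ _ _ hperm hpair]
  simp [pvH, Function.comp_def]
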